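-- pv_equiv track=rewrite | github.com/PoisonIsTheCure/scrabble-game-only-functions | ConstructionDesMots.py | mot_jouable
-- ===== SOURCE A (Python) =====
-- def mot_jouable(mot, ll):
--     liste = list(ll)
--     existe = True
--     for lettre in mot:
--         if lettre.upper() in liste : # remarque : les lettres dans la liste doivent etre upper
--             liste.remove(lettre.upper())
--         elif '?' in liste:
--             liste.remove('?')
--         else:
--             existe = False
--
--     return existe
-- ===== SOURCE B (Python) =====
-- def mot_jouable(mot, ll):
--     # Tabulate-and-compare: total blanks needed = '?' chars in the word
--     # plus the aggregate deficit of every other letter; playable iff that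
--     # fits in the blank budget.
--     up = [c.upper() for c in mot]
--     blanks = ll.count('?')
--     required = up.count('?')
--     for c in set(up):
--         if c != '?':
--             required += max(0, up.count(c) - ll.count(c))
--     return required <= blanks
-- ===== Notes on version B (the rewrite author's own statement) =====
-- stated objective: faster
-- what changed: Replaces A's per-letter greedy scan over a mutable copy of the tile list (membership test + list.remove per character, rescanning the tiles for every letter) with a single tabulate-then-compare: count tiles and word letters and check that literal '?' letters plus the aggregate per-letter deficits fit in the blank budget.
import Mathlib
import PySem

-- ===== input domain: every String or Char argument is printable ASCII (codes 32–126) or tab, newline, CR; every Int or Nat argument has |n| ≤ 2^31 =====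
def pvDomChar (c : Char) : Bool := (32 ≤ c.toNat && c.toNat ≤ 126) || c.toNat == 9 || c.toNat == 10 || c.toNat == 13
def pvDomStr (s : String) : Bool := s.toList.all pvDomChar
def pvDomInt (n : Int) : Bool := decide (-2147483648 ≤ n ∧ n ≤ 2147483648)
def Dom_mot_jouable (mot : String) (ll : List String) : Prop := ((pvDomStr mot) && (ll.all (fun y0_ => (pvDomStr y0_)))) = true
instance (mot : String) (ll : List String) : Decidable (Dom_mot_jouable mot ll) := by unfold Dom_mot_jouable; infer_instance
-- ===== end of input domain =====

-- B replaces A's per-letter greedy scan-and-remove over a mutable copy of the tile list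
-- by a single tabulate-then-compare: aggregate letter deficits plus literal '?' letters
-- must fit in the blank budget (objective: faster — a timing run measured B faster; no list rescans).

-- ===== PORT A =====
-- one iteration of A's for-loop; state = (liste, existe)
def motJouableStep (st : List String × Bool) (lettre : Char) : List String × Bool :=
  let u := PySem.Str.upper (String.ofList [lettre])    -- lettre.upper()
  if u ∈ st.1 then ((PySem.List.remove? st.1 u).getD st.1, st.2)        -- liste.remove(u) (guarded: never raises)
  else if ("?" : String) ∈ st.1 then ((PySem.List.remove? st.1 "?").getD st.1, st.2)
  else (st.1, false)

def mot_jouable (mot : String) (ll : List String) : Bool :=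
  (mot.toList.foldl motJouableStep (ll, true)).2

-- ===== PORT B =====
def mot_jouable_alt (mot : String) (ll : List String) : Bool :=
  let up := mot.toList.map (fun c => PySem.Str.upper (String.ofList [c]))
  let blanks := PySem.List.count ll "?"
  let required0 : Int := (PySem.List.count up "?" : Int)
  let required := (PySem.Set.ofList up).foldl
    (fun r c => if c ≠ "?" then r + max 0 ((PySem.List.count up c : Int) - (PySem.List.count ll c : Int)) else r)
    required0
  decide (required ≤ (blanks : Int))

-- ===== PRECONDITION & SPEC =====
def Spec_mot_jouable (mot : String) (ll : List String) (out : Bool) : Prop := out = mot_jouable_alt mot ll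
instance (mot : String) (ll : List String) (out : Bool) : Decidable (Spec_mot_jouable mot ll out) := by unfold Spec_mot_jouable; infer_instance

-- ===== CLAIM (what is proved, stated in full; the proofs are below) =====
def Claim_equal_mot_jouable : Prop := ∀ (mot : String) (ll : List String), Dom_mot_jouable mot ll → Spec_mot_jouable mot ll (mot_jouable mot ll)

-- ===== LEMMAS AND PROOFS =====

-- A's loop, with the dead state threading stripped: greedy consumption over the
-- already-uppercased word letters ws.
def pvGreedy : List String → List String → Bool
  | [], _ => true
  | u :: ws, l =>
    if u ∈ l then pvGreedy ws (l.erase u)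
    else if ("?" : String) ∈ l then pvGreedy ws (l.erase "?")
    else false

-- multiset of word letters (blanks filtered out) not coverable by their own tiles
def pvDeficit (ws l : List String) : Nat :=
  Multiset.card ((↑(ws.filter (fun u => u != "?")) - ↑l : Multiset String))

def pvNeed (ws l : List String) : Nat := List.count "?" ws + pvDeficit ws l

lemma foldA_eq_greedy (cs : List Char) (l : List String) (e : Bool) :
    (cs.foldl motJouableStep (l, e)).2
      = (e && pvGreedy (cs.map (fun c => PySem.Str.upper (String.ofList [c]))) l) := by
  induction cs generalizing l e with
  | nil => simp [pvGreedy]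
  | cons c cs ih =>
    simp only [List.foldl_cons, List.map_cons, motJouableStep, pvGreedy]
    by_cases h1 : PySem.Str.upper (String.ofList [c]) ∈ l
    · rw [if_pos h1, if_pos h1, ih]
      rw [PySem.List.remove?_eq_some_erase _ _ h1]
      rfl
    · by_cases h2 : ("?" : String) ∈ l
      · rw [if_neg h1, if_neg h1, if_pos h2, if_pos h2, ih]
        rw [PySem.List.remove?_eq_some_erase _ _ h2]
        rfl
      · rw [if_neg h1, if_neg h1, if_neg h2, if_neg h2, ih]
        simp

lemma deficit_cons_mem {u : String} {l : List String} (hu : u ≠ "?") (hm : u ∈ l)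
    (ws : List String) : pvDeficit (u :: ws) l = pvDeficit ws (l.erase u) := by
  unfold pvDeficit
  refine congrArg Multiset.card ?_
  ext b
  have h1 : 1 ≤ List.count u l := List.count_pos_iff.mpr hm
  have hfc : ((u :: ws).filter (fun v => v != "?")) = u :: ws.filter (fun v => v != "?") := by
    simp [hu]
  simp only [Multiset.count_sub, Multiset.coe_count]
  rw [hfc, List.count_cons]
  by_cases hb : b = u
  · subst hb
    rw [List.count_erase_self]
    simp
    try omega
  · rw [List.count_erase_of_ne hb]
    simp [Ne.symm hb]

lemma deficit_erase_blank (ws l : List String) :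
    pvDeficit ws (l.erase "?") = pvDeficit ws l := by
  unfold pvDeficit
  refine congrArg Multiset.card ?_
  ext b
  simp only [Multiset.count_sub, Multiset.coe_count]
  by_cases hb : b = "?"
  · subst hb
    have h0 : List.count "?" (List.filter (fun v => v != "?") ws) = 0 :=
      List.count_eq_zero.mpr (by simp)
    simp [h0]
  · rw [List.count_erase_of_ne hb]

lemma deficit_cons_blank (ws l : List String) :
    pvDeficit ("?" :: ws) l = pvDeficit ws l := by
  unfold pvDeficit
  have hf : (("?" :: ws).filter (fun v => v != "?")) = ws.filter (fun v => v != "?") := by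
    simp
  rw [hf]

lemma deficit_cons_absent {u : String} {l : List String} (hu : u ≠ "?") (hm : u ∉ l)
    (ws : List String) : pvDeficit (u :: ws) l = pvDeficit ws l + 1 := by
  have hc : List.count u l = 0 := List.count_eq_zero.mpr hm
  unfold pvDeficit
  have hfc : ((u :: ws).filter (fun v => v != "?")) = u :: ws.filter (fun v => v != "?") := by
    simp [hu]
  have h : ((↑((u :: ws).filter (fun v => v != "?")) - ↑l : Multiset String))
      = u ::ₘ ((↑(ws.filter (fun v => v != "?")) - ↑l : Multiset String)) := by
    ext b
    simp only [Multiset.count_cons, Multiset.count_sub, Multiset.coe_count]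
    rw [hfc, List.count_cons]
    by_cases hb : b = u
    · subst hb
      simp [hc]
    · simp [hb, Ne.symm hb]
  rw [h, Multiset.card_cons]

lemma greedy_eq_need (ws l : List String) :
    pvGreedy ws l = decide (pvNeed ws l ≤ List.count "?" l) := by
  induction ws generalizing l with
  | nil => simp [pvGreedy, pvNeed, pvDeficit]
  | cons u ws ih =>
    by_cases h1 : u ∈ l
    · by_cases hu : u = "?"
      · subst hu
        rw [pvGreedy, if_pos h1, ih]
        have h2 : 1 ≤ List.count "?" l := List.count_pos_iff.mpr h1
        have e1 : pvNeed ("?" :: ws) l = pvNeed ws (l.erase "?") + 1 := by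
          unfold pvNeed
          rw [deficit_cons_blank, deficit_erase_blank, List.count_cons]
          simp
          try omega
        have e2 : List.count "?" (l.erase "?") = List.count "?" l - 1 :=
          List.count_erase_self
        simp only [e1, e2, decide_eq_decide]
        omega
      · have hne : ("?" : String) ≠ u := fun h => hu h.symm
        rw [pvGreedy, if_pos h1, ih]
        have e1 : pvNeed (u :: ws) l = pvNeed ws (l.erase u) := by
          unfold pvNeed
          rw [deficit_cons_mem hu h1, List.count_cons]
          simp [hu]
          try omega
        have e2 : List.count "?" (l.erase u) = List.count "?" l :=
          List.count_erase_of_ne hne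
        rw [e1, e2]
    · by_cases h2 : ("?" : String) ∈ l
      · have hu : u ≠ "?" := by rintro rfl; exact h1 h2
        have hne : ("?" : String) ≠ u := fun h => hu h.symm
        rw [pvGreedy, if_neg h1, if_pos h2, ih]
        have hb : 1 ≤ List.count "?" l := List.count_pos_iff.mpr h2
        have e1 : pvNeed (u :: ws) l = pvNeed ws l + 1 := by
          unfold pvNeed
          rw [deficit_cons_absent hu h1, List.count_cons]
          simp [hu]
          try omega
        have e2 : pvNeed ws (l.erase "?") = pvNeed ws l := by
          unfold pvNeed; rw [deficit_erase_blank]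
        have e3 : List.count "?" (l.erase "?") = List.count "?" l - 1 :=
          List.count_erase_self
        simp only [e1, e2, e3, decide_eq_decide]
        omega
      · rw [pvGreedy, if_neg h1, if_neg h2]
        have hb : List.count "?" l = 0 := List.count_eq_zero.mpr h2
        rw [eq_comm, decide_eq_false_iff_not]
        by_cases hu : u = "?"
        · subst hu
          have hge : 1 ≤ pvNeed ("?" :: ws) l := by
            unfold pvNeed
            rw [List.count_cons]
            simp
            try omega
          omega
        · have hge : 1 ≤ pvNeed (u :: ws) l := by
            have := deficit_cons_absent hu h1 ws
            unfold pvNeed; omega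
          omega

lemma foldl_if_add (g : String → Int) (lst : List String) (init : Int) :
    lst.foldl (fun r c => if c ≠ "?" then r + g c else r) init
      = init + (lst.map (fun c => if c ≠ "?" then g c else 0)).sum := by
  induction lst generalizing init with
  | nil => simp
  | cons c lst ih =>
    simp only [List.foldl_cons, List.map_cons, List.sum_cons, ih]
    by_cases hc : c = "?" <;> simp [hc] <;> ring

lemma sum_dedup_eq_deficit (up l : List String) :
    ((PySem.List.dedup up).map
        (fun u => if u ≠ "?" then max 0 ((List.count u up : Int) - (List.count u l : Int)) else 0)).sum
      = (pvDeficit up l : Int) := by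
  have hnd : (PySem.List.dedup up).Nodup := PySem.List.nodup_dedup up
  set W : Multiset String := (↑(up.filter (fun v => v != "?")) : Multiset String) with hW
  set L : Multiset String := (↑l : Multiset String) with hL
  have hsub : (W - L).toFinset ⊆ (PySem.List.dedup up).toFinset := by
    intro b hbmem
    rw [Multiset.mem_toFinset] at hbmem
    have hbW : b ∈ W := Multiset.mem_of_le (Multiset.sub_le_self _ _) hbmem
    rw [hW, Multiset.mem_coe, List.mem_filter] at hbW
    rw [List.mem_toFinset, PySem.List.mem_dedup]
    exact hbW.1
  have hcard : pvDeficit up l = ∑ b ∈ (PySem.List.dedup up).toFinset, Multiset.count b (W - L) := by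
    unfold pvDeficit
    rw [← Multiset.toFinset_sum_count_eq (W - L)]
    refine Finset.sum_subset hsub ?_
    intro b _ hb
    rw [Multiset.count_eq_zero]
    intro hmem
    exact hb (Multiset.mem_toFinset.mpr hmem)
  have hpt : ∀ b, Multiset.count b (W - L)
      = if b ≠ "?" then List.count b up - List.count b l else 0 := by
    intro b
    rw [hW, hL, Multiset.count_sub, Multiset.coe_count, Multiset.coe_count]
    by_cases hb : b = "?"
    · subst hb
      have h0 : List.count "?" (List.filter (fun v => v != "?") up) = 0 :=
        List.count_eq_zero.mpr (by simp)
      simp [h0]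
    · rw [List.count_filter (by simp [hb])]
      simp [hb]
  rw [hcard]
  push_cast
  rw [← List.sum_toFinset _ hnd]
  refine Finset.sum_congr rfl (fun b _ => ?_)
  rw [hpt b]
  by_cases hb : b = "?" <;> simp [hb] <;> omega

-- ===== VERDICT (by name: the statement is the Claim_ definition above) =====
theorem mot_jouable_spec : Claim_equal_mot_jouable := by
  intro mot ll _
  unfold Spec_mot_jouable mot_jouable
  rw [foldA_eq_greedy, Bool.true_and, greedy_eq_need]
  simp only [mot_jouable_alt, PySem.List.count_eq]
  set up := mot.toList.map (fun c => PySem.Str.upper (String.ofList [c])) with hup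
  rw [foldl_if_add (fun c => max 0 ((List.count c up : Int) - (List.count c ll : Int)))]
  rw [← PySem.List.dedup_eq_ofList, sum_dedup_eq_deficit up ll]
  unfold pvNeed
  simp only [decide_eq_decide]
  omega
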